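-- pv_equiv track=rewrite | github.com/s17kf/aoc-2021-python | day19/solve19.py | has_12_common_beacons
-- ===== SOURCE A (Python) =====
-- SIN = [0, 1, 0, -1, 0]
--
-- COS = [1, 0, -1, 0, 1]
--
-- def turn(coords, n, axis):
--     x, y, z = coords
--     sin = SIN[n]
--     cos = COS[n]
--     match axis:
--         case 'x':
--             return x, cos * y + sin * z, cos * z - sin * y
--         case 'y':
--             return cos * x + sin * z, y, cos * z - sin * x
--         case 'z':
--             return cos * x + sin * y, cos * y - sin * x, z
--
-- def turn_scanner_data(scanner_data, n, axis):
--     for i, data in enumerate(scanner_data):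
--         scanner_data[i] = turn(data, n, axis)
--
-- def count_common(scanner1_data, scanner2_data, offset):
--     offset_x, offset_y, offset_z = offset
--     common_beacons = 0
--     for x, y, z in scanner2_data:
--         if (x + offset_x, y + offset_y, z + offset_z) in scanner1_data:
--             common_beacons += 1
--     return common_beacons
--
-- def get_offset_if_12_common(scanner1_data, scanner_2_data):
--     for x1, y1, z1 in scanner1_data:
--         for x2, y2, z2 in scanner_2_data:
--             offset = x1 - x2, y1 - y2, z1 - z2
--             if count_common(scanner1_data, scanner_2_data, offset) >= 12:
--                 return True, offset
--     return False, None
--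
-- def has_12_common_beacons(scanner1_data, scanner2_data):
--     scanner2_data_copy = scanner2_data.copy()
--     for x in range(4):
--         turn_scanner_data(scanner2_data_copy, 1, 'x')
--         for y in range(4):
--             turn_scanner_data(scanner2_data_copy, 1, 'y')
--             for z in range(4):
--                 turn_scanner_data(scanner2_data_copy, 1, 'z')
--                 is_12_common, offset = get_offset_if_12_common(scanner1_data, scanner2_data_copy)
--                 if is_12_common:
--                     turn_scanner_data(scanner2_data, x + 1, 'x')
--                     turn_scanner_data(scanner2_data, y + 1, 'y')
--                     turn_scanner_data(scanner2_data, z + 1, 'z')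
--                     offset_x, offset_y, offset_z = offset
--                     for i, (xx, yy, zz) in enumerate(scanner2_data):
--                         scanner2_data[i] = xx + offset_x, yy + offset_y, zz + offset_z
--
--                     return True, offset
--     return False, None
-- ===== SOURCE B (Python) =====
-- # B: flat enumeration of the 64 orientations; per orientation apply the composed
-- # rotation, tally ALL pairwise offsets once into a dict, then pick the first
-- # candidate offset (in A's scan order) whose tally is >= 12 via an O(1) lookup --
-- # replacing A's per-candidate O(n*m) count_common rescans.
-- # NOTE: unlike A, B does not mutate scanner2_data on success; the equivalence is
-- # about the return value only.
--
-- def _rx(p):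
--     x, y, z = p
--     return (x, z, -y)
--
-- def _ry(p):
--     x, y, z = p
--     return (z, y, -x)
--
-- def _rz(p):
--     x, y, z = p
--     return (y, -x, z)
--
-- def _rotate(p, x, y, z):
--     for _ in range(x):
--         p = _rx(p)
--     for _ in range(y):
--         p = _ry(p)
--     for _ in range(z):
--         p = _rz(p)
--     return p
--
-- def has_12_common_beacons(scanner1_data, scanner2_data):
--     s1_distinct = set(scanner1_data)
--     orients = [(x + 1, y + 1, z + 1)
--                for x in range(4) for y in range(4) for z in range(4)]
--     for (x, y, z) in orients:
--         rotated = [_rotate(p, x, y, z) for p in scanner2_data]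
--         counts = {}
--         for q in rotated:
--             for p in s1_distinct:
--                 o = (p[0] - q[0], p[1] - q[1], p[2] - q[2])
--                 counts[o] = counts.get(o, 0) + 1
--         cands = [(p[0] - q[0], p[1] - q[1], p[2] - q[2])
--                  for p in scanner1_data for q in rotated]
--         hit = next((o for o in cands if counts.get(o, 0) >= 12), None)
--         if hit is not None:
--             return True, hit
--     return False, None
-- ===== Notes on version B (the rewrite author's own statement) =====
-- stated objective: faster
-- what changed: B enumerates the 64 orientations as one flat list, applies the composed rotation directly, tallies all pairwise scanner1-minus-scanner2 offsets once per orientation into a dict, and returns the first candidate offset (in A's scan order) whose tally is >= 12 via an O(1) lookup; A instead turns the copy cumulatively in place through three nested range(4) loops and reruns count_common (a full scan of scanner2 with list membership in scanner1) for every candidate pair. B does not mutate scanner2_data in place on success; the equivalence is about the return value.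
import Mathlib
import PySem

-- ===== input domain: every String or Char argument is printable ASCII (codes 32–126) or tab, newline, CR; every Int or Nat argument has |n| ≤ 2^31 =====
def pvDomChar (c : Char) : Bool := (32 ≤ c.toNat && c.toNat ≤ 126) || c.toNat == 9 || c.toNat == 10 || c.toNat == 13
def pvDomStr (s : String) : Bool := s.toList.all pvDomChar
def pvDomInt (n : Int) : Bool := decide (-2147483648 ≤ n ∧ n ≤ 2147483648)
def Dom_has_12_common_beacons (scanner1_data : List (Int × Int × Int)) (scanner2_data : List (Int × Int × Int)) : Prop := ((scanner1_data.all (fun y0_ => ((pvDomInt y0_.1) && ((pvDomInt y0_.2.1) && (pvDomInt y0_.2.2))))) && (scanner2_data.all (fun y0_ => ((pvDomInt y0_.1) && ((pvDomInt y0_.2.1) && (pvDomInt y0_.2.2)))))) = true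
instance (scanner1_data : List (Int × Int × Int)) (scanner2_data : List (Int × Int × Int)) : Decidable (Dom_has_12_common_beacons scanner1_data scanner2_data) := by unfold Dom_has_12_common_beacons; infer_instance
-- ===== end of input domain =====

-- B enumerates the 64 orientations as one flat list, tallies all pairwise offsets
-- once per orientation into a dict and finds the first candidate with an O(1)
-- lookup; A reruns a full count_common scan per candidate inside cumulative
-- in-place turning loops. NOTE: Python A mutates scanner2_data in place on
-- success; B does not. The equivalence proved here is about the RETURN VALUE only.

-- ===== PORT A =====
def pvSIN : List Int := [0, 1, 0, -1, 0]
def pvCOS : List Int := [1, 0, -1, 0, 1]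

-- turn(coords, n, axis); n is always 1 at the call sites this port reaches (index
-- in range, so pyGetD is exact), and axis is always 'x'/'y'/'z' (default branch unreachable).
def pvTurn (coords : Int × Int × Int) (n : Int) (axis : Char) : Int × Int × Int :=
  match coords with
  | (x, y, z) =>
    let sin := PySem.List.pyGetD pvSIN n 0
    let cos := PySem.List.pyGetD pvCOS n 0
    match axis with
    | 'x' => (x, cos * y + sin * z, cos * z - sin * y)
    | 'y' => (cos * x + sin * z, y, cos * z - sin * x)
    | 'z' => (cos * x + sin * y, cos * y - sin * x, z)
    | _ => (x, y, z)

def pvTurnScannerData (sd : List (Int × Int × Int)) (n : Int) (axis : Char) : List (Int × Int × Int) :=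
  sd.map (fun d => pvTurn d n axis)

def pvCountCommon (s1 s2 : List (Int × Int × Int)) (off : Int × Int × Int) : Int :=
  s2.foldl (fun acc p =>
    if (p.1 + off.1, p.2.1 + off.2.1, p.2.2 + off.2.2) ∈ s1 then acc + 1 else acc) 0

def pvInnerA (s1 s2 : List (Int × Int × Int)) (p1 : Int × Int × Int) :
    List (Int × Int × Int) → Option (Int × Int × Int)
  | [] => none
  | p2 :: rest =>
    let off := (p1.1 - p2.1, p1.2.1 - p2.2.1, p1.2.2 - p2.2.2)
    if pvCountCommon s1 s2 off ≥ 12 then some off else pvInnerA s1 s2 p1 rest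

def pvOuterA (s1 s2 : List (Int × Int × Int)) :
    List (Int × Int × Int) → Bool × Option (Int × Int × Int)
  | [] => (false, none)
  | p1 :: rest =>
    match pvInnerA s1 s2 p1 s2 with
    | some off => (true, some off)
    | none => pvOuterA s1 s2 rest

def pvGetOffsetIf12 (s1 s2 : List (Int × Int × Int)) : Bool × Option (Int × Int × Int) :=
  pvOuterA s1 s2 s1

-- the three nested 'for … in range(4)' loops, fuel = remaining iterations; each
-- threads the mutated copy of scanner2 (the success-branch mutation of scanner2_data
-- itself is a side effect that does not reach the return value and is not ported)
def pvZLoopA (s1 : List (Int × Int × Int)) :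
    Nat → List (Int × Int × Int) → Option (Int × Int × Int) × List (Int × Int × Int)
  | 0, copy => (none, copy)
  | k + 1, copy =>
    let copy' := pvTurnScannerData copy 1 'z'
    match pvGetOffsetIf12 s1 copy' with
    | (true, off) => (off, copy')
    | (false, _) => pvZLoopA s1 k copy'

def pvYLoopA (s1 : List (Int × Int × Int)) :
    Nat → List (Int × Int × Int) → Option (Int × Int × Int) × List (Int × Int × Int)
  | 0, copy => (none, copy)
  | k + 1, copy =>
    let copy' := pvTurnScannerData copy 1 'y'
    match pvZLoopA s1 4 copy' with
    | (some off, c2) => (some off, c2)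
    | (none, c2) => pvYLoopA s1 k c2

def pvXLoopA (s1 : List (Int × Int × Int)) :
    Nat → List (Int × Int × Int) → Option (Int × Int × Int) × List (Int × Int × Int)
  | 0, copy => (none, copy)
  | k + 1, copy =>
    let copy' := pvTurnScannerData copy 1 'x'
    match pvYLoopA s1 4 copy' with
    | (some off, c2) => (some off, c2)
    | (none, c2) => pvXLoopA s1 k c2

def has_12_common_beacons (scanner1_data : List (Int × Int × Int)) (scanner2_data : List (Int × Int × Int)) : Bool × (Option (Int × Int × Int)) :=
  match pvXLoopA scanner1_data 4 scanner2_data with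
  | (some off, _) => (true, some off)
  | (none, _) => (false, none)

-- ===== PORT B =====
def pvRx (p : Int × Int × Int) : Int × Int × Int := (p.1, p.2.2, -p.2.1)
def pvRy (p : Int × Int × Int) : Int × Int × Int := (p.2.2, p.2.1, -p.1)
def pvRz (p : Int × Int × Int) : Int × Int × Int := (p.2.1, -p.1, p.2.2)

-- _rotate's three 'for _ in range(…)' repetition loops
def pvRotate (p : Int × Int × Int) (x y z : Nat) : Int × Int × Int :=
  pvRz^[z] (pvRy^[y] (pvRx^[x] p))

-- the flat orientation comprehension of Source B
def pvOrients : List (Nat × Nat × Nat) :=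
  (List.range 4).flatMap (fun x =>
    (List.range 4).flatMap (fun y =>
      (List.range 4).map (fun z => (x + 1, y + 1, z + 1))))

-- the offset-tally dict built once per orientation
def pvTally (s1d : List (Int × Int × Int)) (rotated : List (Int × Int × Int)) :
    PySem.Dict (Int × Int × Int) Int :=
  rotated.foldl (fun d p2 =>
    s1d.foldl (fun d p1 =>
      let o := (p1.1 - p2.1, p1.2.1 - p2.2.1, p1.2.2 - p2.2.2)
      d.insert o (d.getD o 0 + 1)) d) PySem.Dict.empty

-- the 'cands' comprehension of Source B
def pvCands (s1 rotated : List (Int × Int × Int)) : List (Int × Int × Int) :=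
  s1.flatMap (fun p1 =>
    rotated.map (fun p2 => (p1.1 - p2.1, p1.2.1 - p2.2.1, p1.2.2 - p2.2.2)))

-- one orientation: rotate, tally, first qualifying candidate ('next(…, None)')
def pvTryOrient (s1 s1d s2 : List (Int × Int × Int)) (o : Nat × Nat × Nat) :
    Option (Int × Int × Int) :=
  let rotated := s2.map (fun p => pvRotate p o.1 o.2.1 o.2.2)
  let counts := pvTally s1d rotated
  (pvCands s1 rotated).find? (fun c => decide (counts.getD c 0 ≥ 12))

def has_12_common_beacons_alt (scanner1_data : List (Int × Int × Int)) (scanner2_data : List (Int × Int × Int)) : Bool × (Option (Int × Int × Int)) :=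
  let s1d := PySem.Set.ofList scanner1_data
  match pvOrients.findSome? (pvTryOrient scanner1_data s1d scanner2_data) with
  | some o => (true, some o)
  | none => (false, none)

-- ===== PRECONDITION & SPEC =====
def Spec_has_12_common_beacons (scanner1_data : List (Int × Int × Int)) (scanner2_data : List (Int × Int × Int)) (out : Bool × (Option (Int × Int × Int))) : Prop := out = has_12_common_beacons_alt scanner1_data scanner2_data
instance (scanner1_data : List (Int × Int × Int)) (scanner2_data : List (Int × Int × Int)) (out : Bool × (Option (Int × Int × Int))) : Decidable (Spec_has_12_common_beacons scanner1_data scanner2_data out) := by unfold Spec_has_12_common_beacons; infer_instance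

-- ===== CLAIM (what is proved, stated in full; the proofs are below) =====
def Claim_equal_has_12_common_beacons : Prop := ∀ (scanner1_data : List (Int × Int × Int)) (scanner2_data : List (Int × Int × Int)), Dom_has_12_common_beacons scanner1_data scanner2_data → Spec_has_12_common_beacons scanner1_data scanner2_data (has_12_common_beacons scanner1_data scanner2_data)

-- ===== LEMMAS AND PROOFS =====

-- the three unit turns of A are B's rotation functions
theorem pvTurn_x (p : Int × Int × Int) : pvTurn p 1 'x' = pvRx p := by
  obtain ⟨x, y, z⟩ := p
  simp [pvTurn, pvRx, pvSIN, pvCOS, PySem.List.pyGetD, PySem.List.pyGet?, PySem.List.pyIdx?]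

theorem pvTurn_y (p : Int × Int × Int) : pvTurn p 1 'y' = pvRy p := by
  obtain ⟨x, y, z⟩ := p
  simp [pvTurn, pvRy, pvSIN, pvCOS, PySem.List.pyGetD, PySem.List.pyGet?, PySem.List.pyIdx?]

theorem pvTurn_z (p : Int × Int × Int) : pvTurn p 1 'z' = pvRz p := by
  obtain ⟨x, y, z⟩ := p
  simp [pvTurn, pvRz, pvSIN, pvCOS, PySem.List.pyGetD, PySem.List.pyGet?, PySem.List.pyIdx?]

theorem pvRy_four (p : Int × Int × Int) : pvRy^[4] p = p := by
  obtain ⟨x, y, z⟩ := p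
  simp [Function.iterate_succ_apply', pvRy]

theorem pvRz_four (p : Int × Int × Int) : pvRz^[4] p = p := by
  obtain ⟨x, y, z⟩ := p
  simp [Function.iterate_succ_apply', pvRz]

-- counting: A's count_common as a sum of indicators
theorem pvCountCommon_eq_sum (s1 s2 : List (Int × Int × Int)) (off : Int × Int × Int) :
    pvCountCommon s1 s2 off =
      (s2.map (fun p => if (p.1 + off.1, p.2.1 + off.2.1, p.2.2 + off.2.2) ∈ s1 then (1 : Int) else 0)).sum := by
  unfold pvCountCommon
  have hf : (fun (acc : Int) (p : Int × Int × Int) =>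
      if (p.1 + off.1, p.2.1 + off.2.1, p.2.2 + off.2.2) ∈ s1 then acc + 1 else acc) =
      (fun (acc : Int) (p : Int × Int × Int) =>
        acc + (if (p.1 + off.1, p.2.1 + off.2.1, p.2.2 + off.2.2) ∈ s1 then (1 : Int) else 0)) := by
    funext acc p
    split_ifs <;> simp
  rw [hf, PySem.List.foldl_add]
  simp

-- offsets are an injective function of the first beacon
theorem pvSub_inj (p2 : Int × Int × Int) :
    Function.Injective (fun p1 : Int × Int × Int => (p1.1 - p2.1, p1.2.1 - p2.2.1, p1.2.2 - p2.2.2)) := by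
  rintro ⟨a, b, c⟩ ⟨d, e, f⟩ h
  simp only [Prod.mk.injEq] at h
  obtain ⟨h1, h2, h3⟩ := h
  refine Prod.ext ?_ (Prod.ext ?_ ?_) <;> simp <;> omega

-- the inner tally loop of one p2 adds the membership indicator at key o
theorem pvTallyInner_getD (s1 : List (Int × Int × Int)) (p2 : Int × Int × Int)
    (d : PySem.Dict (Int × Int × Int) Int) (o : Int × Int × Int) :
    ((PySem.Set.ofList s1).foldl (fun d p1 =>
        let o := (p1.1 - p2.1, p1.2.1 - p2.2.1, p1.2.2 - p2.2.2)
        d.insert o (d.getD o 0 + 1)) d).getD o 0 =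
      d.getD o 0 + (if (p2.1 + o.1, p2.2.1 + o.2.1, p2.2.2 + o.2.2) ∈ s1 then (1 : Int) else 0) := by
  have hmap : ((PySem.Set.ofList s1).map
      (fun p1 : Int × Int × Int => (p1.1 - p2.1, p1.2.1 - p2.2.1, p1.2.2 - p2.2.2))).foldl
        (fun d k => PySem.Dict.insert d k (d.getD k 0 + 1)) d =
      (PySem.Set.ofList s1).foldl (fun d p1 =>
        let o := (p1.1 - p2.1, p1.2.1 - p2.2.1, p1.2.2 - p2.2.2)
        d.insert o (d.getD o 0 + 1)) d := List.foldl_map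
  rw [← hmap, PySem.Dict.getD_foldl_insert_add_one]
  by_cases hm : (p2.1 + o.1, p2.2.1 + o.2.1, p2.2.2 + o.2.2) ∈ s1
  · rw [if_pos hm]
    have hc : List.count o ((PySem.Set.ofList s1).map
        (fun p1 : Int × Int × Int => (p1.1 - p2.1, p1.2.1 - p2.2.1, p1.2.2 - p2.2.2))) = 1 := by
      rw [show o = (fun p1 : Int × Int × Int => (p1.1 - p2.1, p1.2.1 - p2.2.1, p1.2.2 - p2.2.2))
          (p2.1 + o.1, p2.2.1 + o.2.1, p2.2.2 + o.2.2) from by simp,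
        List.count_map_of_injective _ _ (pvSub_inj p2)]
      exact List.count_eq_one_of_mem (PySem.Set.nodup_ofList s1)
        ((PySem.Set.mem_ofList s1 _).mpr hm)
    rw [hc]
    simp
  · rw [if_neg hm]
    have hc : List.count o ((PySem.Set.ofList s1).map
        (fun p1 : Int × Int × Int => (p1.1 - p2.1, p1.2.1 - p2.2.1, p1.2.2 - p2.2.2))) = 0 := by
      rw [show o = (fun p1 : Int × Int × Int => (p1.1 - p2.1, p1.2.1 - p2.2.1, p1.2.2 - p2.2.2))
          (p2.1 + o.1, p2.2.1 + o.2.1, p2.2.2 + o.2.2) from by simp,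
        List.count_map_of_injective _ _ (pvSub_inj p2)]
      exact List.count_eq_zero_of_not_mem (fun hc => hm ((PySem.Set.mem_ofList s1 _).mp hc))
    rw [hc]
    simp

-- B's tally dict looks up to A's count_common
theorem pvTally_getD (s1 s1d : List (Int × Int × Int)) (hd : s1d = PySem.Set.ofList s1)
    (r : List (Int × Int × Int)) (o : Int × Int × Int) :
    (pvTally s1d r).getD o 0 = pvCountCommon s1 r o := by
  subst hd
  rw [pvCountCommon_eq_sum]
  unfold pvTally
  suffices aux : ∀ (r : List (Int × Int × Int)) (d : PySem.Dict (Int × Int × Int) Int),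
      (r.foldl (fun d p2 =>
        (PySem.Set.ofList s1).foldl (fun d p1 =>
          let o := (p1.1 - p2.1, p1.2.1 - p2.2.1, p1.2.2 - p2.2.2)
          d.insert o (d.getD o 0 + 1)) d) d).getD o 0 =
      d.getD o 0 +
        (r.map (fun p => if (p.1 + o.1, p.2.1 + o.2.1, p.2.2 + o.2.2) ∈ s1 then (1 : Int) else 0)).sum by
    rw [aux r PySem.Dict.empty]
    simp [PySem.Dict.getD_empty]
  intro r
  induction r with
  | nil => intro d; simp
  | cons p2 rest ih =>
    intro d
    simp only [List.foldl_cons, List.map_cons, List.sum_cons]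
    rw [ih, pvTallyInner_getD s1 p2 d o]
    ring

-- A's inner scan over one p1 is find? on the mapped candidate row
theorem pvInnerA_eq_find (s1 r : List (Int × Int × Int)) (p1 : Int × Int × Int)
    (l : List (Int × Int × Int)) :
    pvInnerA s1 r p1 l =
      (l.map (fun p2 => (p1.1 - p2.1, p1.2.1 - p2.2.1, p1.2.2 - p2.2.2))).find?
        (fun c => decide (pvCountCommon s1 r c ≥ 12)) := by
  induction l with
  | nil => rfl
  | cons p2 rest ih =>
    simp only [pvInnerA, List.map_cons, List.find?_cons]
    by_cases h : pvCountCommon s1 r (p1.1 - p2.1, p1.2.1 - p2.2.1, p1.2.2 - p2.2.2) ≥ 12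
    · simp [h]
    · simp [h, ih]

-- A's whole per-orientation candidate scan is find? over B's flat cands list
theorem pvOuterA_eq_find (s1 r : List (Int × Int × Int)) (l : List (Int × Int × Int)) :
    pvOuterA s1 r l =
      (match (pvCands l r).find? (fun c => decide (pvCountCommon s1 r c ≥ 12)) with
       | some o => (true, some o)
       | none => (false, none)) := by
  induction l with
  | nil => rfl
  | cons p1 rest ih =>
    simp only [pvOuterA, pvCands, List.flatMap_cons, List.find?_append,
      pvInnerA_eq_find s1 r p1 r, ih]
    cases ((r.map (fun p2 => (p1.1 - p2.1, p1.2.1 - p2.2.1, p1.2.2 - p2.2.2))).find?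
        (fun c => decide (pvCountCommon s1 r c ≥ 12))) <;> simp

-- A's per-orientation check equals B's pvTryOrient on the matching rotated list
theorem pvGetOffset_eq_try (s1 s1d s2 : List (Int × Int × Int))
    (hd : s1d = PySem.Set.ofList s1) (x y z : Nat) :
    pvGetOffsetIf12 s1 (s2.map (fun p => pvRotate p x y z)) =
      (match pvTryOrient s1 s1d s2 (x, y, z) with
       | some o => (true, some o)
       | none => (false, none)) := by
  unfold pvGetOffsetIf12 pvTryOrient
  rw [pvOuterA_eq_find]
  have : (fun c => decide (pvCountCommon s1 (s2.map (fun p => pvRotate p x y z)) c ≥ 12)) =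
      (fun c => decide ((pvTally s1d (s2.map (fun p => pvRotate p x y z))).getD c 0 ≥ 12)) := by
    funext c
    rw [pvTally_getD s1 s1d hd]
  rw [this]

-- unit turns over a whole list
theorem pvTurnMap_x (l : List (Int × Int × Int)) : pvTurnScannerData l 1 'x' = l.map pvRx := by
  unfold pvTurnScannerData
  simp only [pvTurn_x]

theorem pvTurnMap_y (l : List (Int × Int × Int)) : pvTurnScannerData l 1 'y' = l.map pvRy := by
  unfold pvTurnScannerData
  simp only [pvTurn_y]

theorem pvTurnMap_z (l : List (Int × Int × Int)) : pvTurnScannerData l 1 'z' = l.map pvRz := by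
  unfold pvTurnScannerData
  simp only [pvTurn_z]

-- findSome? distributes over flatMap
theorem pvFindSome_flatMap {α β γ : Type} (l : List α) (g : α → List β) (f : β → Option γ) :
    ((l.flatMap g).findSome? f) = l.findSome? (fun a => (g a).findSome? f) := by
  induction l with
  | nil => rfl
  | cons a rest ih =>
    rw [List.flatMap_cons, List.findSome?_append, List.findSome?_cons]
    cases h : (g a).findSome? f with
    | some v => simp
    | none => simpa using ih

-- pointwise congruence for findSome?
theorem pvFindSome_ext {α γ : Type} (l : List α) {f g : α → Option γ} (h : ∀ a, f a = g a) :
    l.findSome? f = l.findSome? g := by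
  rw [funext h]

-- peeling the first index off a shifted findSome? over a range: hit at the head
theorem pvFindSome_range_pos {γ : Type} (k j : Nat) (f : Nat → Option γ) (o : γ)
    (h : f (j + 1) = some o) :
    (List.range (k + 1)).findSome? (fun i => f (j + 1 + i)) = some o := by
  rw [List.range_succ_eq_map, List.findSome?_cons]
  simp only [Nat.add_zero, h]

-- peeling the first index off a shifted findSome? over a range: miss at the head
theorem pvFindSome_range_neg {γ : Type} (k j : Nat) (f : Nat → Option γ)
    (h : f (j + 1) = none) :
    (List.range (k + 1)).findSome? (fun i => f (j + 1 + i)) =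
      (List.range k).findSome? (fun i => f (j + 1 + 1 + i)) := by
  rw [List.range_succ_eq_map, List.findSome?_cons]
  have h2 : ((fun i => f (j + 1 + i)) ∘ Nat.succ) = fun i => f (j + 1 + 1 + i) := by
    funext i
    exact congrArg f (by omega)
  simp only [Nat.add_zero, h, List.findSome?_map, h2]

-- the z loop of A aligned with B's findSome? over the remaining z indices
theorem pvZ_align (s1 s1d s2 : List (Int × Int × Int)) (hd : s1d = PySem.Set.ofList s1)
    (x y : Nat) : ∀ (k j : Nat),
    (pvZLoopA s1 k (s2.map (fun p => pvRz^[j] (pvRy^[y] (pvRx^[x] p))))).1 =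
      (List.range k).findSome? (fun i => pvTryOrient s1 s1d s2 (x, y, j + 1 + i)) ∧
    ((pvZLoopA s1 k (s2.map (fun p => pvRz^[j] (pvRy^[y] (pvRx^[x] p))))).1 = none →
      (pvZLoopA s1 k (s2.map (fun p => pvRz^[j] (pvRy^[y] (pvRx^[x] p))))).2 =
        s2.map (fun p => pvRz^[j + k] (pvRy^[y] (pvRx^[x] p)))) := by
  intro k
  induction k with
  | zero =>
    intro j
    constructor
    · simp [pvZLoopA]
    · intro _
      simp [pvZLoopA]
  | succ k ih =>
    intro j
    have hcomp : (pvRz ∘ fun p => pvRz^[j] (pvRy^[y] (pvRx^[x] p))) =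
        fun p => pvRz^[j + 1] (pvRy^[y] (pvRx^[x] p)) := by
      funext p
      simp [Function.comp, Function.iterate_succ_apply']
    have hcopy : pvTurnScannerData (s2.map (fun p => pvRz^[j] (pvRy^[y] (pvRx^[x] p)))) 1 'z' =
        s2.map (fun p => pvRz^[j + 1] (pvRy^[y] (pvRx^[x] p))) := by
      rw [pvTurnMap_z, List.map_map, hcomp]
    cases ht : pvTryOrient s1 s1d s2 (x, y, j + 1) with
    | some o =>
      have hgo : pvGetOffsetIf12 s1 (s2.map (fun p => pvRz^[j + 1] (pvRy^[y] (pvRx^[x] p)))) =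
          (true, some o) := by
        have h := pvGetOffset_eq_try s1 s1d s2 hd x y (j + 1)
        rw [ht] at h
        exact h
      have hr := pvFindSome_range_pos k j (fun z => pvTryOrient s1 s1d s2 (x, y, z)) o ht
      simp only [pvZLoopA, hcopy, hgo, hr]
      exact ⟨trivial, fun hn => by simp at hn⟩
    | none =>
      have hgo : pvGetOffsetIf12 s1 (s2.map (fun p => pvRz^[j + 1] (pvRy^[y] (pvRx^[x] p)))) =
          (false, none) := by
        have h := pvGetOffset_eq_try s1 s1d s2 hd x y (j + 1)
        rw [ht] at h
        exact h
      have hr := pvFindSome_range_neg k j (fun z => pvTryOrient s1 s1d s2 (x, y, z)) ht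
      simp only [pvZLoopA, hcopy, hgo, hr]
      refine ⟨(ih (j + 1)).1, fun hn => ?_⟩
      rw [show j + (k + 1) = (j + 1) + k from by omega]
      exact (ih (j + 1)).2 hn

-- the y loop of A aligned with B's findSome? over the remaining y indices
theorem pvY_align (s1 s1d s2 : List (Int × Int × Int)) (hd : s1d = PySem.Set.ofList s1)
    (x : Nat) : ∀ (k j : Nat),
    (pvYLoopA s1 k (s2.map (fun p => pvRy^[j] (pvRx^[x] p)))).1 =
      (List.range k).findSome? (fun i =>
        (List.range 4).findSome? (fun iz => pvTryOrient s1 s1d s2 (x, j + 1 + i, iz + 1))) ∧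
    ((pvYLoopA s1 k (s2.map (fun p => pvRy^[j] (pvRx^[x] p)))).1 = none →
      (pvYLoopA s1 k (s2.map (fun p => pvRy^[j] (pvRx^[x] p)))).2 =
        s2.map (fun p => pvRy^[j + k] (pvRx^[x] p))) := by
  intro k
  induction k with
  | zero =>
    intro j
    constructor
    · simp [pvYLoopA]
    · intro _
      simp [pvYLoopA]
  | succ k ih =>
    intro j
    have hcomp : (pvRy ∘ fun p => pvRy^[j] (pvRx^[x] p)) =
        fun p => pvRy^[j + 1] (pvRx^[x] p) := by
      funext p
      simp [Function.comp, Function.iterate_succ_apply']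
    have hcopy : pvTurnScannerData (s2.map (fun p => pvRy^[j] (pvRx^[x] p))) 1 'y' =
        s2.map (fun p => pvRy^[j + 1] (pvRx^[x] p)) := by
      rw [pvTurnMap_y, List.map_map, hcomp]
    obtain ⟨hzf, hzs⟩ := pvZ_align s1 s1d s2 hd x (j + 1) 4 0
    simp only [Function.iterate_zero_apply] at hzf hzs
    have hzf' : (pvZLoopA s1 4 (s2.map (fun p => pvRy^[j + 1] (pvRx^[x] p)))).1 =
        (List.range 4).findSome? (fun iz => pvTryOrient s1 s1d s2 (x, j + 1, iz + 1)) := by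
      rw [hzf]
      exact pvFindSome_ext (List.range 4)
        (fun i => congrArg (fun t => pvTryOrient s1 s1d s2 (x, j + 1, t)) (by omega))
    rcases hz : pvZLoopA s1 4 (s2.map (fun p => pvRy^[j + 1] (pvRx^[x] p))) with ⟨zres, c2⟩
    rw [hz] at hzf' hzs
    cases zres with
    | some o =>
      have hh : (List.range 4).findSome? (fun iz => pvTryOrient s1 s1d s2 (x, j + 1, iz + 1)) =
          some o := hzf'.symm
      have hr := pvFindSome_range_pos k j
        (fun yy => (List.range 4).findSome? (fun iz => pvTryOrient s1 s1d s2 (x, yy, iz + 1))) o hh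
      simp only [pvYLoopA, hcopy, hz, hr]
      exact ⟨trivial, fun hn => by simp at hn⟩
    | none =>
      have hh : (List.range 4).findSome? (fun iz => pvTryOrient s1 s1d s2 (x, j + 1, iz + 1)) =
          none := hzf'.symm
      have hr := pvFindSome_range_neg k j
        (fun yy => (List.range 4).findSome? (fun iz => pvTryOrient s1 s1d s2 (x, yy, iz + 1))) hh
      have hc2 : c2 = s2.map (fun p => pvRy^[j + 1] (pvRx^[x] p)) := by
        have h4 : c2 = s2.map (fun p => pvRz^[0 + 4] (pvRy^[j + 1] (pvRx^[x] p))) := hzs rfl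
        rw [h4]
        apply List.map_congr_left
        intro p _
        rw [show (0 + 4 : Nat) = 4 from rfl, pvRz_four]
      simp only [pvYLoopA, hcopy, hz, hr]
      rw [hc2]
      refine ⟨(ih (j + 1)).1, fun hn => ?_⟩
      rw [show j + (k + 1) = (j + 1) + k from by omega]
      exact (ih (j + 1)).2 hn

-- the x loop of A aligned with B's findSome? over the remaining x indices
theorem pvX_align (s1 s1d s2 : List (Int × Int × Int)) (hd : s1d = PySem.Set.ofList s1) :
    ∀ (k j : Nat),
    (pvXLoopA s1 k (s2.map (fun p => pvRx^[j] p))).1 =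
      (List.range k).findSome? (fun i =>
        (List.range 4).findSome? (fun iy =>
          (List.range 4).findSome? (fun iz => pvTryOrient s1 s1d s2 (j + 1 + i, iy + 1, iz + 1)))) := by
  intro k
  induction k with
  | zero =>
    intro j
    simp [pvXLoopA]
  | succ k ih =>
    intro j
    have hcomp : (pvRx ∘ fun p => pvRx^[j] p) = fun p => pvRx^[j + 1] p := by
      funext p
      simp [Function.comp, Function.iterate_succ_apply']
    have hcopy : pvTurnScannerData (s2.map (fun p => pvRx^[j] p)) 1 'x' =
        s2.map (fun p => pvRx^[j + 1] p) := by
      rw [pvTurnMap_x, List.map_map, hcomp]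
    obtain ⟨hyf, hys⟩ := pvY_align s1 s1d s2 hd (j + 1) 4 0
    simp only [Function.iterate_zero_apply] at hyf hys
    have hyf' : (pvYLoopA s1 4 (s2.map (fun p => pvRx^[j + 1] p))).1 =
        (List.range 4).findSome? (fun iy =>
          (List.range 4).findSome? (fun iz => pvTryOrient s1 s1d s2 (j + 1, iy + 1, iz + 1))) := by
      rw [hyf]
      refine pvFindSome_ext (List.range 4) (fun iy => ?_)
      exact pvFindSome_ext (List.range 4)
        (fun iz => congrArg (fun t => pvTryOrient s1 s1d s2 (j + 1, t, iz + 1)) (by omega))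
    rcases hy : pvYLoopA s1 4 (s2.map (fun p => pvRx^[j + 1] p)) with ⟨yres, c2⟩
    rw [hy] at hyf' hys
    cases yres with
    | some o =>
      have hh : (List.range 4).findSome? (fun iy =>
          (List.range 4).findSome? (fun iz => pvTryOrient s1 s1d s2 (j + 1, iy + 1, iz + 1))) =
          some o := hyf'.symm
      have hr := pvFindSome_range_pos k j
        (fun xx => (List.range 4).findSome? (fun iy =>
          (List.range 4).findSome? (fun iz => pvTryOrient s1 s1d s2 (xx, iy + 1, iz + 1)))) o hh
      simp only [pvXLoopA, hcopy, hy, hr]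
    | none =>
      have hh : (List.range 4).findSome? (fun iy =>
          (List.range 4).findSome? (fun iz => pvTryOrient s1 s1d s2 (j + 1, iy + 1, iz + 1))) =
          none := hyf'.symm
      have hr := pvFindSome_range_neg k j
        (fun xx => (List.range 4).findSome? (fun iy =>
          (List.range 4).findSome? (fun iz => pvTryOrient s1 s1d s2 (xx, iy + 1, iz + 1)))) hh
      have hc2 : c2 = s2.map (fun p => pvRx^[j + 1] p) := by
        have h4 : c2 = s2.map (fun p => pvRy^[0 + 4] (pvRx^[j + 1] p)) := hys rfl
        rw [h4]
        apply List.map_congr_left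
        intro p _
        rw [show (0 + 4 : Nat) = 4 from rfl, pvRy_four]
      simp only [pvXLoopA, hcopy, hy, hr]
      rw [hc2]
      exact ih (j + 1)

-- B's flat orientation scan as the nested range findSome? the alignments produce
theorem pvOrients_findSome (s1 s1d s2 : List (Int × Int × Int)) :
    pvOrients.findSome? (pvTryOrient s1 s1d s2) =
      (List.range 4).findSome? (fun ix =>
        (List.range 4).findSome? (fun iy =>
          (List.range 4).findSome? (fun iz => pvTryOrient s1 s1d s2 (ix + 1, iy + 1, iz + 1)))) := by
  unfold pvOrients
  rw [pvFindSome_flatMap]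
  refine pvFindSome_ext (List.range 4) (fun ix => ?_)
  rw [pvFindSome_flatMap]
  refine pvFindSome_ext (List.range 4) (fun iy => ?_)
  rw [List.findSome?_map]
  rfl

-- ===== VERDICT (by name: the statement is the Claim_ definition above) =====
theorem has_12_common_beacons_spec : Claim_equal_has_12_common_beacons := by
  intro s1 s2 _
  unfold Spec_has_12_common_beacons
  simp only [has_12_common_beacons, has_12_common_beacons_alt]
  have h0 : s2 = s2.map (fun p => pvRx^[0] p) := by simp
  have h := pvX_align s1 (PySem.Set.ofList s1) s2 rfl 4 0
  have h' : (pvXLoopA s1 4 (s2.map (fun p => pvRx^[0] p))).1 =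
      pvOrients.findSome? (pvTryOrient s1 (PySem.Set.ofList s1) s2) := by
    rw [h, pvOrients_findSome]
    refine pvFindSome_ext (List.range 4) (fun ix => ?_)
    refine pvFindSome_ext (List.range 4) (fun iy => ?_)
    exact pvFindSome_ext (List.range 4)
      (fun iz => congrArg (fun t => pvTryOrient s1 (PySem.Set.ofList s1) s2 (t, iy + 1, iz + 1)) (by omega))
  conv_lhs => rw [h0]
  rcases hx : pvXLoopA s1 4 (s2.map (fun p => pvRx^[0] p)) with ⟨res, c⟩
  rw [hx] at h'
  have hres : res = pvOrients.findSome? (pvTryOrient s1 (PySem.Set.ofList s1) s2) := h'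
  rw [← hres]
  cases res <;> rfl
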